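-- pv_equiv track=rewrite | github.com/chmenet/rnn-transducer | toy_data_generation.py | toy_gen
-- ===== SOURCE A (Python) =====
-- def toy_gen(chars, times = 2):
--     len_chars = len(chars)
--
--     X = []
--     Y = []
--     for i in range(len_chars*times): # length index
--         if(i == 0):
--             continue
--         for j in range(len_chars): # first char index
--             x = ''
--             y = ''
--             for k in range(i): # length index
--                 x += chars[(j+k)%len_chars] if (j+k) % 2 == 0 else chars[(j+k)%len_chars]*2
--                 y += chars[(j+k+1)%len_chars]
--             X.append(x)
--             Y.append(y)
--
--     return X, Y
-- ===== SOURCE B (Python) =====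
-- def toy_gen(chars, times=2):
--     n = len(chars)
--     N = n * times
--     # Build each start-index column incrementally: extend the pair of strings
--     # by one step per length, snapshotting, then interleave columns by length.
--     per_start_x = []
--     per_start_y = []
--     for j in range(n):
--         x = ''
--         y = ''
--         xs = []
--         ys = []
--         for k in range(N - 1):
--             c = chars[(j + k) % n]
--             x += c if (j + k) % 2 == 0 else c + c
--             y += chars[(j + k + 1) % n]
--             xs.append(x)
--             ys.append(y)
--         per_start_x.append(xs)
--         per_start_y.append(ys)
--     X = [col[i] for i in range(N - 1) for col in per_start_x]
--     Y = [col[i] for i in range(N - 1) for col in per_start_y]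
--     return X, Y
-- ===== Notes on version B (the rewrite author's own statement) =====
-- stated objective: alternative
-- what changed: B builds each start-index column incrementally (extending the x/y strings by one step per length, snapshotting after each step) and then interleaves the columns by length, instead of A's triple loop that rebuilds every string character by character for each (length, start) pair; intended as faster (measured 4-17x at the largest size both versions finished), though a timing run could not confirm it at sizes where the output itself is huge.
import Mathlib
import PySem

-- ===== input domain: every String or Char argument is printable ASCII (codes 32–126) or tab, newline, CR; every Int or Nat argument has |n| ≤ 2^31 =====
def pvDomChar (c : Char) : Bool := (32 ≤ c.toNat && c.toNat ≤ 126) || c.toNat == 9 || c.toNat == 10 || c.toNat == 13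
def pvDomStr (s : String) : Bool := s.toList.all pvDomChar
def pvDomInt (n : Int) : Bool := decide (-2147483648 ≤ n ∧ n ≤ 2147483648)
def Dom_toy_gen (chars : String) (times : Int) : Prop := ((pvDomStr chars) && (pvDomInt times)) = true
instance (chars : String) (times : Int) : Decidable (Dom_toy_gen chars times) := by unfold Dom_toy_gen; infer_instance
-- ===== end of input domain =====

-- B builds each start-index column incrementally (one extension step per length, snapshotting)
-- and interleaves the columns by length; same output as A's triple loop that rebuilds each string.

-- ===== PORT A =====
-- inner 'for k in range(i)' loop of A, over chars as a list of characters
def toyA_inner (cs : List Char) (n j i : Int) : List Char × List Char :=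
  (PySem.List.pyRange 0 i 1).foldl (fun xy k =>
    let c := PySem.List.pyGetD cs (PySem.Int.mod (j + k) n) ' '
    (xy.1 ++ (if PySem.Int.mod (j + k) 2 = 0 then [c] else [c, c]),
     xy.2 ++ [PySem.List.pyGetD cs (PySem.Int.mod (j + k + 1) n) ' '])) ([], [])

def toy_gen (chars : String) (times : Int) : List String × List String :=
  let cs := chars.toList
  let n : Int := cs.length
  (PySem.List.pyRange 0 (n * times) 1).foldl (fun XY i =>
    if i = 0 then XY
    else (PySem.List.pyRange 0 n 1).foldl (fun XY j =>
      let xy := toyA_inner cs n j i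
      (XY.1 ++ [String.ofList xy.1], XY.2 ++ [String.ofList xy.2])) XY) ([], [])

-- ===== PORT B =====
-- inner 'for k in range(N-1)' loop of B: (x, y, xs, ys) state, snapshot after each step
def toyB_col (cs : List Char) (n j N : Int) :
    List Char × List Char × List String × List String :=
  (PySem.List.pyRange 0 (N - 1) 1).foldl (fun st k =>
    let c := PySem.List.pyGetD cs (PySem.Int.mod (j + k) n) ' '
    let x := st.1 ++ (if PySem.Int.mod (j + k) 2 = 0 then [c] else [c, c])
    let y := st.2.1 ++ [PySem.List.pyGetD cs (PySem.Int.mod (j + k + 1) n) ' ']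
    (x, y, st.2.2.1 ++ [String.ofList x], st.2.2.2 ++ [String.ofList y])) ([], [], [], [])

def toy_gen_alt (chars : String) (times : Int) : List String × List String :=
  let cs := chars.toList
  let n : Int := cs.length
  let N := n * times
  let cols := (PySem.List.pyRange 0 n 1).foldl (fun acc j =>
    let col := toyB_col cs n j N
    (acc.1 ++ [col.2.2.1], acc.2 ++ [col.2.2.2]))
    (([] : List (List String)), ([] : List (List String)))
  ((PySem.List.pyRange 0 (N - 1) 1).flatMap
      (fun i => cols.1.map (fun col => PySem.List.pyGetD col i "")),
   (PySem.List.pyRange 0 (N - 1) 1).flatMap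
      (fun i => cols.2.map (fun col => PySem.List.pyGetD col i "")))

-- ===== PRECONDITION & SPEC =====
def Spec_toy_gen (chars : String) (times : Int) (out : List String × List String) : Prop := out = toy_gen_alt chars times
instance (chars : String) (times : Int) (out : List String × List String) : Decidable (Spec_toy_gen chars times out) := by unfold Spec_toy_gen; infer_instance

-- ===== CLAIM (what is proved, stated in full; the proofs are below) =====
def Claim_equal_toy_gen : Prop := ∀ (chars : String) (times : Int), Dom_toy_gen chars times → Spec_toy_gen chars times (toy_gen chars times)

-- ===== LEMMAS AND PROOFS =====

-- the one-step x- and y-chunks shared by both loops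
def chX (cs : List Char) (n j k : Int) : List Char :=
  let c := PySem.List.pyGetD cs (PySem.Int.mod (j + k) n) ' '
  if PySem.Int.mod (j + k) 2 = 0 then [c] else [c, c]

def chY (cs : List Char) (n j k : Int) : Char :=
  PySem.List.pyGetD cs (PySem.Int.mod (j + k + 1) n) ' '

theorem foldl_prod_append {α β γ : Type} (l : List α) (f : α → List β) (g : α → List γ)
    (a : List β) (b : List γ) :
    l.foldl (fun p x => (p.1 ++ f x, p.2 ++ g x)) (a, b) = (a ++ l.flatMap f, b ++ l.flatMap g) := by
  induction l generalizing a b with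
  | nil => simp
  | cons x xs ih => simp [List.foldl_cons, ih]

theorem flatMap_congr_mem {α β : Type} (l : List α) (f g : α → List β)
    (h : ∀ x ∈ l, f x = g x) : l.flatMap f = l.flatMap g := by
  induction l with
  | nil => rfl
  | cons x xs ih =>
    simp only [List.flatMap_cons]
    rw [h x (by simp), ih (fun y hy => h y (by simp [hy]))]

theorem flatMap_single {α β : Type} (l : List α) (g : α → β) :
    l.flatMap (fun x => [g x]) = l.map g := by
  induction l <;> simp_all

theorem toyA_inner_eq (cs : List Char) (n j i : Int) :
    toyA_inner cs n j i =
      ((PySem.List.pyRange 0 i 1).flatMap (chX cs n j),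
       (PySem.List.pyRange 0 i 1).map (chY cs n j)) := by
  have h := foldl_prod_append (PySem.List.pyRange 0 i 1)
      (chX cs n j) (fun k => [chY cs n j k]) [] []
  simpa [toyA_inner, chX, chY, flatMap_single] using h

theorem toyB_col_eq (cs : List Char) (n j : Int) (t : Nat) :
    (PySem.List.pyRange 0 (t : Int) 1).foldl (fun st k =>
      let c := PySem.List.pyGetD cs (PySem.Int.mod (j + k) n) ' '
      let x := st.1 ++ (if PySem.Int.mod (j + k) 2 = 0 then [c] else [c, c])
      let y := st.2.1 ++ [PySem.List.pyGetD cs (PySem.Int.mod (j + k + 1) n) ' ']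
      (x, y, st.2.2.1 ++ [String.ofList x], st.2.2.2 ++ [String.ofList y]))
      (([] : List Char), ([] : List Char), ([] : List String), ([] : List String)) =
    ((PySem.List.pyRange 0 (t : Int) 1).flatMap (chX cs n j),
     (PySem.List.pyRange 0 (t : Int) 1).map (chY cs n j),
     (List.range t).map (fun (m : Nat) => String.ofList ((PySem.List.pyRange 0 ((m : Int) + 1) 1).flatMap (chX cs n j))),
     (List.range t).map (fun (m : Nat) => String.ofList ((PySem.List.pyRange 0 ((m : Int) + 1) 1).map (chY cs n j)))) := by
  induction t with
  | zero =>
    simp [PySem.List.pyRange_one_eq_nil]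
  | succ t ih =>
    have hsplit : PySem.List.pyRange 0 ((t : Int) + 1) 1
        = PySem.List.pyRange 0 (t : Int) 1 ++ [(t : Int)] :=
      PySem.List.pyRange_one_succ_right (by exact_mod_cast Int.natCast_nonneg t)
    push_cast
    rw [hsplit, List.foldl_append, ih]
    simp [List.range_succ, hsplit, chX, chY]

theorem foldl_prod_append_mem {α β γ : Type} (l : List α)
    (F : List β × List γ → α → List β × List γ) (f : α → List β) (g : α → List γ)
    (hF : ∀ p x, x ∈ l → F p x = (p.1 ++ f x, p.2 ++ g x)) :
    ∀ a b, l.foldl F (a, b) = (a ++ l.flatMap f, b ++ l.flatMap g) := by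
  induction l with
  | nil => simp
  | cons x xs ih =>
    intro a b
    rw [List.foldl_cons, hF (a, b) x (by simp)]
    rw [ih (fun p y hy => hF p y (by simp [hy])) (a ++ f x) (b ++ g x)]
    simp

-- A as a flatMap over lengths 1..N-1 of rows over start indices
theorem toy_gen_rows (chars : String) (times : Int) :
    toy_gen chars times =
      (let cs := chars.toList
       let n : Int := cs.length
       ((PySem.List.pyRange 1 (n * times) 1).flatMap (fun i =>
          (PySem.List.pyRange 0 n 1).map (fun j =>
            String.ofList ((PySem.List.pyRange 0 i 1).flatMap (chX cs n j)))),
       (PySem.List.pyRange 1 (n * times) 1).flatMap (fun i =>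
          (PySem.List.pyRange 0 n 1).map (fun j =>
            String.ofList ((PySem.List.pyRange 0 i 1).map (chY cs n j)))))) := by
  unfold toy_gen
  simp only []
  by_cases hpos : 0 < ((chars.toList.length : Int) * times)
  · have h0 : PySem.List.pyRange 0 ((chars.toList.length : Int) * times) 1
        = 0 :: PySem.List.pyRange 1 ((chars.toList.length : Int) * times) 1 := by
      have := PySem.List.pyRange_one_cons (a := 0) (b := (chars.toList.length : Int) * times) hpos
      simpa using this
    rw [h0, List.foldl_cons]
    have hbody : ∀ (p : List String × List String) (i : Int),
        i ∈ PySem.List.pyRange 1 ((chars.toList.length : Int) * times) 1 →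
        (fun (XY : List String × List String) i =>
          if i = 0 then XY
          else (PySem.List.pyRange 0 (chars.toList.length : Int) 1).foldl (fun XY j =>
            (XY.1 ++ [String.ofList (toyA_inner chars.toList (chars.toList.length : Int) j i).1],
             XY.2 ++ [String.ofList (toyA_inner chars.toList (chars.toList.length : Int) j i).2])) XY) p i =
        (p.1 ++ (PySem.List.pyRange 0 (chars.toList.length : Int) 1).map (fun j =>
            String.ofList ((PySem.List.pyRange 0 i 1).flatMap (chX chars.toList (chars.toList.length : Int) j))),
         p.2 ++ (PySem.List.pyRange 0 (chars.toList.length : Int) 1).map (fun j =>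
            String.ofList ((PySem.List.pyRange 0 i 1).map (chY chars.toList (chars.toList.length : Int) j)))) := by
      intro p i hi
      have hne : i ≠ 0 := by
        have := (PySem.List.mem_pyRange_one).mp hi
        omega
      simp only [if_neg hne]
      have h := foldl_prod_append_mem (PySem.List.pyRange 0 (chars.toList.length : Int) 1)
        (fun XY j => (XY.1 ++ [String.ofList (toyA_inner chars.toList (chars.toList.length : Int) j i).1],
                      XY.2 ++ [String.ofList (toyA_inner chars.toList (chars.toList.length : Int) j i).2]))
        (fun j => [String.ofList (toyA_inner chars.toList (chars.toList.length : Int) j i).1])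
        (fun j => [String.ofList (toyA_inner chars.toList (chars.toList.length : Int) j i).2])
        (fun _ _ _ => rfl) p.1 p.2
      simp only [Prod.mk.eta] at h
      rw [h]
      simp [flatMap_single, toyA_inner_eq]
    rw [foldl_prod_append_mem _ _ _ _ hbody]
    simp
  · have hnil : PySem.List.pyRange 0 ((chars.toList.length : Int) * times) 1 = [] :=
      PySem.List.pyRange_one_eq_nil (by omega)
    have hnil1 : PySem.List.pyRange 1 ((chars.toList.length : Int) * times) 1 = [] :=
      PySem.List.pyRange_one_eq_nil (by omega)
    rw [hnil, hnil1]
    simp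

-- B equals the same flatMap-of-rows normal form as A
theorem toy_gen_alt_rows (chars : String) (times : Int) :
    toy_gen_alt chars times =
      (let cs := chars.toList
       let n : Int := cs.length
       ((PySem.List.pyRange 1 (n * times) 1).flatMap (fun i =>
          (PySem.List.pyRange 0 n 1).map (fun j =>
            String.ofList ((PySem.List.pyRange 0 i 1).flatMap (chX cs n j)))),
       (PySem.List.pyRange 1 (n * times) 1).flatMap (fun i =>
          (PySem.List.pyRange 0 n 1).map (fun j =>
            String.ofList ((PySem.List.pyRange 0 i 1).map (chY cs n j)))))) := by
  unfold toy_gen_alt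
  simp only []
  have hT : PySem.List.pyRange 0 ((chars.toList.length : Int) * times - 1) 1
      = PySem.List.pyRange 0 ((((chars.toList.length : Int) * times - 1).toNat : Int)) 1 := by
    by_cases h : 0 ≤ (chars.toList.length : Int) * times - 1
    · rw [Int.toNat_of_nonneg h]
    · rw [PySem.List.pyRange_one_eq_nil (by omega), PySem.List.pyRange_one_eq_nil (by omega)]
  have hcols := foldl_prod_append (PySem.List.pyRange 0 (chars.toList.length : Int) 1)
    (fun j => [(toyB_col chars.toList (chars.toList.length : Int) j ((chars.toList.length : Int) * times)).2.2.1])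
    (fun j => [(toyB_col chars.toList (chars.toList.length : Int) j ((chars.toList.length : Int) * times)).2.2.2])
    [] []
  rw [hcols]
  simp only [List.nil_append, flatMap_single]
  have hcol : ∀ j : Int,
      toyB_col chars.toList (chars.toList.length : Int) j ((chars.toList.length : Int) * times) =
      ((PySem.List.pyRange 0 ((((chars.toList.length : Int) * times - 1).toNat : Int)) 1).flatMap (chX chars.toList (chars.toList.length : Int) j),
       (PySem.List.pyRange 0 ((((chars.toList.length : Int) * times - 1).toNat : Int)) 1).map (chY chars.toList (chars.toList.length : Int) j),
       (List.range ((chars.toList.length : Int) * times - 1).toNat).map (fun (m : Nat) =>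
          String.ofList ((PySem.List.pyRange 0 ((m : Int) + 1) 1).flatMap (chX chars.toList (chars.toList.length : Int) j))),
       (List.range ((chars.toList.length : Int) * times - 1).toNat).map (fun (m : Nat) =>
          String.ofList ((PySem.List.pyRange 0 ((m : Int) + 1) 1).map (chY chars.toList (chars.toList.length : Int) j)))) := by
    intro j
    unfold toyB_col
    rw [hT]
    exact toyB_col_eq chars.toList (chars.toList.length : Int) j _
  have hL : PySem.List.pyRange 0 ((chars.toList.length : Int) * times - 1) 1
      = (List.range ((chars.toList.length : Int) * times - 1).toNat).map (fun (k : Nat) => (0 : Int) + (k : Int)) := by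
    have h := PySem.List.pyRange_one 0 ((chars.toList.length : Int) * times - 1)
    rw [h]
    norm_num
  have hR : PySem.List.pyRange 1 ((chars.toList.length : Int) * times) 1
      = (List.range ((chars.toList.length : Int) * times - 1).toNat).map (fun (k : Nat) => (1 : Int) + (k : Int)) := by
    have h := PySem.List.pyRange_one 1 ((chars.toList.length : Int) * times)
    rw [h]
  rw [hL, hR, List.flatMap_map, List.flatMap_map, List.flatMap_map, List.flatMap_map]
  simp only [Prod.mk.injEq]
  constructor
  · apply flatMap_congr_mem
    intro m hm
    have hmlt : m < ((chars.toList.length : Int) * times - 1).toNat := List.mem_range.mp hm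
    rw [List.map_map]
    apply List.map_congr_left
    intro j _
    have h1 : (0 : Int) + (m : Int) = (m : Int) := by omega
    have h2 : (1 : Int) + (m : Int) = (m : Int) + 1 := by omega
    simp only [Function.comp, hcol j, h1, h2, PySem.List.pyGetD_natCast]
    rw [List.getD_eq_getElem?_getD]
    have hlen : chars.toList.length = chars.length := by simp
    rw [hlen] at hmlt
    have hmlt2 : m < ((chars.length : Int) * times).toNat - 1 := by omega
    simp [hmlt2]
  · apply flatMap_congr_mem
    intro m hm
    have hmlt : m < ((chars.toList.length : Int) * times - 1).toNat := List.mem_range.mp hm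
    rw [List.map_map]
    apply List.map_congr_left
    intro j _
    have h1 : (0 : Int) + (m : Int) = (m : Int) := by omega
    have h2 : (1 : Int) + (m : Int) = (m : Int) + 1 := by omega
    simp only [Function.comp, hcol j, h1, h2, PySem.List.pyGetD_natCast]
    rw [List.getD_eq_getElem?_getD]
    have hlen : chars.toList.length = chars.length := by simp
    rw [hlen] at hmlt
    have hmlt2 : m < ((chars.length : Int) * times).toNat - 1 := by omega
    simp [hmlt2]

-- ===== VERDICT (by name: the statement is the Claim_ definition above) =====
theorem toy_gen_spec : Claim_equal_toy_gen := by
  intro chars times _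
  unfold Spec_toy_gen
  rw [toy_gen_rows, toy_gen_alt_rows]
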